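-- pv_equiv track=rewrite | github.com/chris-han/Vibe-Trading | agent/src/tools/bash_tool.py | _should_force_pty_for_command
-- ===== SOURCE A (Python) =====
-- def _tokenize_shell_command(command: str) -> list[str]:
--     return [token for token in command.lower().replace("=", " ").split() if token]
--
-- def _is_interactive_login_token(token: str) -> bool:
--     if token in {"login", "signin", "auth", "oauth", "sso"}:
--         return True
--     if token.startswith("login:") or token.startswith("signin:"):
--         return True
--     if token.startswith("auth:") or token.startswith("oauth:"):
--         return True
--     return token.endswith("-login") or token.endswith("-auth")
--
-- def _should_force_pty_for_command(command: str) -> bool: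
--     normalized = " ".join(command.lower().split())
--     if "lark-cli config init --new" in normalized:
--         return True
--     if "lark-cli auth login" in normalized:
--         return True
--     if "npx @larksuite/cli config init --new" in normalized:
--         return True
--     if "npx @larksuite/cli auth login" in normalized:
--         return True
--
--     tokens = _tokenize_shell_command(command)
--     if not tokens:
--         return False
--
--     for idx, token in enumerate(tokens):
--         if token.startswith("-"):
--             continue
--         if not _is_interactive_login_token(token):
--             continue
--
--         window = tokens[max(0, idx - 3): min(len(tokens), idx + 4)]
--         if any(arg in {"--help", "-h", "help", "status", "list", "whoami", "doctor"} for arg in window):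
--             continue
--         return True
--
--     return False
-- ===== SOURCE B (Python) =====
-- _EXCLUSIONS = {"--help", "-h", "help", "status", "list", "whoami", "doctor"}
--
-- def _tokenize_shell_command(command: str) -> list[str]:
--     return [token for token in command.lower().replace("=", " ").split() if token]
--
-- def _is_interactive_login_token(token: str) -> bool:
--     if token in {"login", "signin", "auth", "oauth", "sso"}:
--         return True
--     if token.startswith("login:") or token.startswith("signin:"):
--         return True
--     if token.startswith("auth:") or token.startswith("oauth:"):
--         return True
--     return token.endswith("-login") or token.endswith("-auth")
--
-- def _matches_known_phrase(command: str) -> bool: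
--     normalized = " ".join(command.lower().split())
--     return ("lark-cli config init --new" in normalized
--             or "lark-cli auth login" in normalized
--             or "npx @larksuite/cli config init --new" in normalized
--             or "npx @larksuite/cli auth login" in normalized)
--
-- def _should_force_pty_for_command(command: str) -> bool:
--     if _matches_known_phrase(command):
--         return True
--     tokens = _tokenize_shell_command(command)
--     exclusion_positions = [i for i, tok in enumerate(tokens) if tok in _EXCLUSIONS]
--     for idx, token in enumerate(tokens):
--         if not token.startswith("-") and _is_interactive_login_token(token) \
--                 and all(abs(j - idx) > 3 for j in exclusion_positions):
--             return True
--     return False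
-- ===== Notes on version B (the rewrite author's own statement) =====
-- stated objective: alternative
-- what changed: Replaces per-candidate window slicing (tokens[max(0,idx-3):min(len,idx+4)] scanned for exclusion keywords) by a single precomputed list of exclusion-keyword positions tested with a symmetric distance condition abs(j-idx)<=3, and folds the four literal phrase guards into one helper.
import Mathlib
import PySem

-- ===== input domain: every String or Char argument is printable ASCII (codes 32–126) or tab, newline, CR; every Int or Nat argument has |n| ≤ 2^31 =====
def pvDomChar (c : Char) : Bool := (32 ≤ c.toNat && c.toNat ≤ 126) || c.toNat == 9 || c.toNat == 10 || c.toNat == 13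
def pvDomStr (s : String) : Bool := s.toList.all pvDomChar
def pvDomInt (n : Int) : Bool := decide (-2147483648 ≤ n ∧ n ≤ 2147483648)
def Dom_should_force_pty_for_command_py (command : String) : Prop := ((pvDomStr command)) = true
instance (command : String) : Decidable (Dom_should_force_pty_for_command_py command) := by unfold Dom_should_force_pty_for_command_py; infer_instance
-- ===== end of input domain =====

-- B replaces A's per-candidate window slice scan by a precomputed list of exclusion-keyword
-- positions checked with a symmetric distance test (alternative decomposition, same cost class).

-- shared helpers (identical in both Python files)
def pvTokenize (command : String) : List String :=
  (PySem.Str.split₀ (PySem.Str.replace (PySem.Str.lower command) "=" " ")).filter (fun t => t != "")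

def pvInteractive (t : String) : Bool :=
  if t == "login" || t == "signin" || t == "auth" || t == "oauth" || t == "sso" then true
  else if PySem.Str.startswith t "login:" || PySem.Str.startswith t "signin:" then true
  else if PySem.Str.startswith t "auth:" || PySem.Str.startswith t "oauth:" then true
  else PySem.Str.endswith t "-login" || PySem.Str.endswith t "-auth"

def pvIsExcl (t : String) : Bool :=
  t == "--help" || t == "-h" || t == "help" || t == "status" || t == "list" || t == "whoami" || t == "doctor"

-- ===== PORT A =====
def should_force_pty_for_command_py (command : String) : Bool :=
  let normalized := PySem.Str.join " " (PySem.Str.split₀ (PySem.Str.lower command))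
  if PySem.Str.isIn "lark-cli config init --new" normalized then true
  else if PySem.Str.isIn "lark-cli auth login" normalized then true
  else if PySem.Str.isIn "npx @larksuite/cli config init --new" normalized then true
  else if PySem.Str.isIn "npx @larksuite/cli auth login" normalized then true
  else
    let tokens := pvTokenize command
    if tokens.isEmpty then false
    else
      (PySem.List.enumerate tokens 0).any (fun p =>
        if PySem.Str.startswith p.2 "-" then false
        else if !pvInteractive p.2 then false
        else
          let window := PySem.List.slice tokens (some (max 0 (p.1 - 3)))
            (some (min (tokens.length : Int) (p.1 + 4)))
          if window.any pvIsExcl then false else true)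

-- ===== PORT B =====
-- B-side helper: the four literal phrase guards folded into one predicate
def pvKnownPhrase (command : String) : Bool :=
  let normalized := PySem.Str.join " " (PySem.Str.split₀ (PySem.Str.lower command))
  PySem.Str.isIn "lark-cli config init --new" normalized ||
  PySem.Str.isIn "lark-cli auth login" normalized ||
  PySem.Str.isIn "npx @larksuite/cli config init --new" normalized ||
  PySem.Str.isIn "npx @larksuite/cli auth login" normalized

def should_force_pty_for_command_py_alt (command : String) : Bool :=
  if pvKnownPhrase command then true
  else
    let tokens := pvTokenize command
    let exclusionPositions := (PySem.List.enumerate tokens 0).filterMap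
      (fun p => if pvIsExcl p.2 then some p.1 else none)
    (PySem.List.enumerate tokens 0).any (fun p =>
      !PySem.Str.startswith p.2 "-" && pvInteractive p.2 &&
        exclusionPositions.all (fun j => decide (3 < |j - p.1|)))

-- ===== PRECONDITION & SPEC =====
def Spec_should_force_pty_for_command_py (command : String) (out : Bool) : Prop := out = should_force_pty_for_command_py_alt command
instance (command : String) (out : Bool) : Decidable (Spec_should_force_pty_for_command_py command out) := by unfold Spec_should_force_pty_for_command_py; infer_instance

-- ===== CLAIM (what is proved, stated in full; the proofs are below) =====
def Claim_equal_should_force_pty_for_command_py : Prop := ∀ (command : String), Dom_should_force_pty_for_command_py command → Spec_should_force_pty_for_command_py command (should_force_pty_for_command_py command)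

-- ===== LEMMAS AND PROOFS =====

-- membership characterisation of PySem.List.enumerate
lemma pv_mem_enumerate {α : Type} (ts : List α) (s : Int) (p : Int × α) :
    p ∈ PySem.List.enumerate ts s ↔ ∃ k : Nat, ts[k]? = some p.2 ∧ p.1 = s + k := by
  induction ts generalizing s with
  | nil => simp [PySem.List.enumerate_nil]
  | cons x xs ih =>
    simp only [PySem.List.enumerate_cons, List.mem_cons, ih]
    constructor
    · rintro (rfl | ⟨k, hk, hs⟩)
      · exact ⟨0, by simp⟩
      · exact ⟨k + 1, by simpa using hk, by push_cast at hs ⊢; omega⟩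
    · rintro ⟨k, hk, hs⟩
      cases k with
      | zero =>
        left; simp at hk hs; cases p; simp_all
      | succ k =>
        right; exact ⟨k, by simpa using hk, by push_cast at hs ⊢; omega⟩

-- A's window test ↔ existence of a nearby exclusion token
lemma pv_window_iff (ts : List String) (k : Nat) :
    ((PySem.List.slice ts (some (max 0 ((k : Int) - 3)))
        (some (min (ts.length : Int) ((k : Int) + 4)))).any pvIsExcl = true)
      ↔ ∃ m : Nat, ∃ hm : m < ts.length, pvIsExcl ts[m] = true ∧
          (k : Int) - 3 ≤ (m : Int) ∧ (m : Int) ≤ (k : Int) + 3 := by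
  rw [PySem.List.slice_toNat ts (by omega) (by omega), List.any_eq_true]
  constructor
  · rintro ⟨x, hx, hpx⟩
    rw [List.mem_iff_getElem] at hx
    obtain ⟨i, hi, hxi⟩ := hx
    simp only [List.length_take, List.length_drop, lt_min_iff] at hi
    obtain ⟨hi1, hi2⟩ := hi
    have hm : (max 0 ((k:Int) - 3)).toNat + i < ts.length := by omega
    refine ⟨(max 0 ((k:Int) - 3)).toNat + i, hm, ?_, by omega, by omega⟩
    rw [List.getElem_take, List.getElem_drop] at hxi
    rw [← hxi] at hpx
    exact hpx
  · rintro ⟨m, hm, hex, h1, h2⟩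
    refine ⟨ts[m], ?_, hex⟩
    rw [List.mem_iff_getElem]
    refine ⟨m - (max 0 ((k:Int) - 3)).toNat, ?_, ?_⟩
    · simp only [List.length_take, List.length_drop, lt_min_iff]
      constructor <;> omega
    · rw [List.getElem_take, List.getElem_drop]
      congr 1
      omega

-- B's distance test ↔ existence of a nearby exclusion token
lemma pv_expos_iff (ts : List String) (k : Nat) :
    (((PySem.List.enumerate ts 0).filterMap
          (fun p => if pvIsExcl p.2 then some p.1 else none)).all
        (fun j => decide (3 < |j - (k : Int)|)) = false)
      ↔ ∃ m : Nat, ∃ hm : m < ts.length, pvIsExcl ts[m] = true ∧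
          (k : Int) - 3 ≤ (m : Int) ∧ (m : Int) ≤ (k : Int) + 3 := by
  rw [List.all_eq_false]
  constructor
  · rintro ⟨j, hj, hfar⟩
    rw [List.mem_filterMap] at hj
    obtain ⟨p, hp, hgp⟩ := hj
    obtain ⟨m, hm, hs⟩ := (pv_mem_enumerate ts 0 p).1 hp
    obtain ⟨hmlt, hpe⟩ := List.getElem?_eq_some_iff.mp hm
    simp only [decide_eq_true_eq, not_lt, abs_le] at hfar
    by_cases hex : pvIsExcl p.2 = true
    · rw [if_pos hex, Option.some_inj] at hgp
      refine ⟨m, hmlt, by rw [hpe]; exact hex, by omega, by omega⟩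
    · rw [if_neg hex] at hgp
      exact absurd hgp (by simp)
  · rintro ⟨m, hmlt, hex, h1, h2⟩
    refine ⟨(m : Int), List.mem_filterMap.2
      ⟨((m : Int), ts[m]),
        (pv_mem_enumerate ts 0 _).2 ⟨m, by simp [List.getElem?_eq_getElem hmlt], by simp⟩,
        by simp [hex]⟩, ?_⟩
    simp only [decide_eq_true_eq, not_lt, abs_le]
    omega

-- the loop bodies of the two ports agree on every element of the enumeration
lemma pv_body_eq (ts : List String) (p : Int × String) (hp : p ∈ PySem.List.enumerate ts 0) :
    (if PySem.Str.startswith p.2 "-" then false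
     else if !pvInteractive p.2 then false
     else
       let window := PySem.List.slice ts (some (max 0 (p.1 - 3)))
         (some (min (ts.length : Int) (p.1 + 4)))
       if window.any pvIsExcl then false else true)
      = (!PySem.Str.startswith p.2 "-" && pvInteractive p.2 &&
          ((PySem.List.enumerate ts 0).filterMap
            (fun p => if pvIsExcl p.2 then some p.1 else none)).all
            (fun j => decide (3 < |j - p.1|))) := by
  obtain ⟨k, hk, hs⟩ := (pv_mem_enumerate ts 0 p).1 hp
  rw [zero_add] at hs
  by_cases h1 : PySem.Str.startswith p.2 "-" = true
  · rw [if_pos h1, h1]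
    simp
  rw [Bool.not_eq_true] at h1
  by_cases h2 : pvInteractive p.2 = true
  · rw [if_neg (by rw [h1]; exact Bool.false_ne_true), if_neg (by rw [h2]; decide), h1, h2]
    simp only [Bool.not_false, Bool.true_and]
    rw [hs]
    rcases Bool.eq_false_or_eq_true (((PySem.List.enumerate ts 0).filterMap
        (fun p => if pvIsExcl p.2 then some p.1 else none)).all
        (fun j => decide (3 < |j - (k : Int)|))) with hall | hall
    · rw [hall, if_neg]
      intro hwin
      have hfa := (pv_expos_iff ts k).2 ((pv_window_iff ts k).1 hwin)
      rw [hfa] at hall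
      exact Bool.false_ne_true hall
    · obtain hex := (pv_expos_iff ts k).1 hall
      rw [if_pos ((pv_window_iff ts k).2 hex), hall]
  · rw [Bool.not_eq_true] at h2
    rw [if_neg (by rw [h1]; exact Bool.false_ne_true), if_pos (by rw [h2]; decide), h2]
    simp

-- the two search loops agree on any token list
lemma pv_loop_eq (ts : List String) :
    (PySem.List.enumerate ts 0).any (fun p =>
        if PySem.Str.startswith p.2 "-" then false
        else if !pvInteractive p.2 then false
        else
          let window := PySem.List.slice ts (some (max 0 (p.1 - 3)))
            (some (min (ts.length : Int) (p.1 + 4)))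
          if window.any pvIsExcl then false else true)
      = (PySem.List.enumerate ts 0).any (fun p =>
          !PySem.Str.startswith p.2 "-" && pvInteractive p.2 &&
            ((PySem.List.enumerate ts 0).filterMap
              (fun p => if pvIsExcl p.2 then some p.1 else none)).all
              (fun j => decide (3 < |j - p.1|))) := by
  rw [Bool.eq_iff_iff, List.any_eq_true, List.any_eq_true]
  constructor
  · rintro ⟨p, hp, h⟩
    exact ⟨p, hp, (pv_body_eq ts p hp) ▸ h⟩
  · rintro ⟨p, hp, h⟩
    exact ⟨p, hp, (pv_body_eq ts p hp).symm ▸ h⟩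

-- ===== VERDICT (by name: the statement is the Claim_ definition above) =====
theorem should_force_pty_for_command_py_spec : Claim_equal_should_force_pty_for_command_py := by
  intro command _
  unfold Spec_should_force_pty_for_command_py should_force_pty_for_command_py
    should_force_pty_for_command_py_alt pvKnownPhrase
  by_cases g1 : PySem.Str.isIn "lark-cli config init --new"
      (PySem.Str.join " " (PySem.Str.split₀ (PySem.Str.lower command))) = true
  · simp only [g1, if_true, Bool.true_or]
  rw [Bool.not_eq_true] at g1
  by_cases g2 : PySem.Str.isIn "lark-cli auth login"
      (PySem.Str.join " " (PySem.Str.split₀ (PySem.Str.lower command))) = true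
  · simp only [g1, g2, Bool.false_eq_true, if_false, if_true, Bool.false_or, Bool.true_or]
  rw [Bool.not_eq_true] at g2
  by_cases g3 : PySem.Str.isIn "npx @larksuite/cli config init --new"
      (PySem.Str.join " " (PySem.Str.split₀ (PySem.Str.lower command))) = true
  · simp only [g1, g2, g3, Bool.false_eq_true, if_false, if_true, Bool.false_or, Bool.true_or]
  rw [Bool.not_eq_true] at g3
  by_cases g4 : PySem.Str.isIn "npx @larksuite/cli auth login"
      (PySem.Str.join " " (PySem.Str.split₀ (PySem.Str.lower command))) = true
  · simp only [g1, g2, g3, g4, Bool.false_eq_true, if_false, if_true, Bool.false_or, Bool.true_or]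
  rw [Bool.not_eq_true] at g4
  simp only [g1, g2, g3, g4, Bool.false_eq_true, if_false, Bool.false_or]
  cases hts : pvTokenize command with
  | nil => simp [PySem.List.enumerate_nil]
  | cons t rest =>
    simp only [List.isEmpty_cons, Bool.false_eq_true, if_false]
    exact pv_loop_eq (t :: rest)
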